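-- pv_equiv track=rewrite | github.com/datawhalechina/huawei-od-python | codes/others100/105_integer-factorization.py | solve_method_1
-- ===== SOURCE A (Python) =====
-- import math
--
-- def solve_method_1(t):
--     result = []
--     result.append("{}={}".format(t, t))
--     count = 1
--     # 对整数的一半向上取整 因为后面的数没有可能是答案
--     for i in range(math.ceil(t / 2) - 1, 0, -1):
--         sum_num = i
--         expression = "{}={}".format(t, i)
--         for j in range(i + 1, math.ceil(t / 2) + 1):
--             sum_num += j
--             expression = expression + "+" + str(j)
--             if sum_num == t:
--                 result.append(expression)
--                 count += 1
--                 break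
--
--     result.append("Result:{}".format(count))
--     return result
-- ===== SOURCE B (Python) =====
-- import math
--
-- def solve_method_1(t):
--     # Closed form: a run i..j sums to t iff (2j+1)^2 = 1 + 4*(i*i - i + 2*t),
--     # so each start i is checked in O(1) instead of an inner accumulation scan.
--     half = math.ceil(t / 2)
--     found = []
--     for i in range(1, half):
--         disc = 1 + 4 * (i * i - i + 2 * t)
--         r = math.isqrt(disc)
--         if r * r == disc and r % 2 == 1:
--             j = (r - 1) // 2
--             if j >= i + 1:
--                 found.append("{}=".format(t) + "+".join(str(k) for k in range(i, j + 1)))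
--     return ["{}={}".format(t, t)] + found[::-1] + ["Result:{}".format(1 + len(found))]
-- ===== Notes on version B (the rewrite author's own statement) =====
-- stated objective: faster
-- what changed: For each start value, B finds the run's endpoint directly with an integer-square-root perfect-square test on the discriminant of the consecutive-sum equation (constant work per start), instead of A's inner loop that accumulates the sum term by term; B collects the hits forward and reverses once.
import Mathlib
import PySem

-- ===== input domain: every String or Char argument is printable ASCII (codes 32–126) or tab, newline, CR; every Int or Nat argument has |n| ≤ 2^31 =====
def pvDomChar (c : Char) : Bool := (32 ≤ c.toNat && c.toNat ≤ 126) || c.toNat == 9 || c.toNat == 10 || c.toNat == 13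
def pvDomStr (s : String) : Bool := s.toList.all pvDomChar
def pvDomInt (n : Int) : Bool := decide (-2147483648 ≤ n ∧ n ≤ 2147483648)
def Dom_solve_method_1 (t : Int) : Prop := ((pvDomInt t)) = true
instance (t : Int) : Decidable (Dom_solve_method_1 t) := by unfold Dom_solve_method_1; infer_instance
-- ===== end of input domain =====

-- B replaces A's inner accumulation scan by the closed-form endpoint test
-- (2j+1)^2 = 1 + 4*(i*i - i + 2*t), one O(1) check per start i (objective: faster).

-- ===== PORT A =====
-- math.ceil(t/2): exact for |t| ≤ 2^31 (float halving exact below 2^53); ported as -((-t) // 2)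
def pyCeilHalf (t : Int) : Int := -(PySem.Int.floordiv (-t) 2)

-- A's inner 'for j in range(i+1, half+1): … break'; state (sum_num, expression) plus (result, count)
def innerA (t : Int) : List Int → Int → String → List String → Int → List String × Int
  | [], _, _, result, count => (result, count)
  | j :: js, sum_num, expression, result, count =>
      if sum_num + j = t then
        (result ++ [expression ++ "+" ++ PySem.Int.toStr j], count + 1)
      else
        innerA t js (sum_num + j) (expression ++ "+" ++ PySem.Int.toStr j) result count

def solve_method_1 (t : Int) : List String :=
  let result : List String := [] ++ [PySem.Int.toStr t ++ "=" ++ PySem.Int.toStr t]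
  let count : Int := 1
  let p := (PySem.List.pyRange (pyCeilHalf t - 1) 0 (-1)).foldl
    (fun (acc : List String × Int) i =>
      innerA t (PySem.List.pyRange (i + 1) (pyCeilHalf t + 1) 1) i
        (PySem.Int.toStr t ++ "=" ++ PySem.Int.toStr i) acc.1 acc.2)
    (result, count)
  p.1 ++ ["Result:" ++ PySem.Int.toStr p.2]

-- ===== PORT B =====
-- math.isqrt(disc) ported as Nat.sqrt; exact since disc > 0 whenever the loop body runs (t ≥ 3)
def solve_method_1_alt (t : Int) : List String :=
  let half := pyCeilHalf t
  let found := (PySem.List.pyRange 1 half 1).foldl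
    (fun (found : List String) i =>
      let disc := 1 + 4 * (i * i - i + 2 * t)
      let r : Int := (Nat.sqrt disc.toNat : Int)
      if r * r = disc ∧ PySem.Int.mod r 2 = 1 then
        let j := PySem.Int.floordiv (r - 1) 2
        if i + 1 ≤ j then
          found ++ [PySem.Int.toStr t ++ "=" ++
            PySem.Str.join "+" ((PySem.List.pyRange i (j + 1) 1).map PySem.Int.toStr)]
        else found
      else found)
    []
  -- found[::-1] is list reversal (PySem.List.slice?_none_none_neg_one)
  ([PySem.Int.toStr t ++ "=" ++ PySem.Int.toStr t] ++ found.reverse)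
    ++ ["Result:" ++ PySem.Int.toStr (1 + (found.length : Int))]

-- ===== PRECONDITION & SPEC =====
def Spec_solve_method_1 (t : Int) (out : List String) : Prop := out = solve_method_1_alt t
instance (t : Int) (out : List String) : Decidable (Spec_solve_method_1 t out) := by unfold Spec_solve_method_1; infer_instance

-- ===== CLAIM (what is proved, stated in full; the proofs are below) =====
def Claim_equal_solve_method_1 : Prop := ∀ (t : Int), Dom_solve_method_1 t → Spec_solve_method_1 t (solve_method_1 t)

-- ===== LEMMAS AND PROOFS =====

-- closed-form endpoint solver (B's per-start check, as a function)
def solveJ (t i : Int) : Option Int :=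
  if (Nat.sqrt (1 + 4 * (i * i - i + 2 * t)).toNat : Int) *
        (Nat.sqrt (1 + 4 * (i * i - i + 2 * t)).toNat : Int) = 1 + 4 * (i * i - i + 2 * t) ∧
      PySem.Int.mod (Nat.sqrt (1 + 4 * (i * i - i + 2 * t)).toNat : Int) 2 = 1 then
    if i + 1 ≤ PySem.Int.floordiv ((Nat.sqrt (1 + 4 * (i * i - i + 2 * t)).toNat : Int) - 1) 2 then
      some (PySem.Int.floordiv ((Nat.sqrt (1 + 4 * (i * i - i + 2 * t)).toNat : Int) - 1) 2)
    else none
  else none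

-- the expression string "t=i+(i+1)+…+j"
def exprE (t i j : Int) : String :=
  PySem.Int.toStr t ++ "=" ++
    PySem.Str.join "+" ((PySem.List.pyRange i (j + 1) 1).map PySem.Int.toStr)

-- contribution of start i (at most one expression)
def hitT (t i : Int) : List String :=
  match solveJ t i with
  | some j => [exprE t i j]
  | none => []

lemma ceilHalf_bounds (t : Int) : t ≤ 2 * pyCeilHalf t ∧ 2 * pyCeilHalf t ≤ t + 1 := by
  unfold pyCeilHalf
  rw [PySem.Int.floordiv_eq_ediv_of_pos (by norm_num)]
  omega

lemma chars_join_append_singleton (sep c : List Char) :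
    ∀ (ls : List (List Char)), ls ≠ [] →
      PySem.Chars.join sep (ls ++ [c]) = PySem.Chars.join sep ls ++ sep ++ c := by
  intro ls
  induction ls with
  | nil => intro h; exact absurd rfl h
  | cons a as ih =>
    intro _
    cases as with
    | nil => simp [PySem.Chars.join_singleton, PySem.Chars.join_cons_cons]
    | cons b bs =>
      have h1 : (a :: b :: bs) ++ [c] = a :: ((b :: bs) ++ [c]) := by simp
      have h2 : (b :: bs) ++ [c] = b :: (bs ++ [c]) := by simp
      rw [h1, h2, PySem.Chars.join_cons_cons, ← h2, ih (by simp),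
        PySem.Chars.join_cons_cons]
      simp [List.append_assoc]

lemma join_append_singleton (sep : String) (l : List String) (x : String) (h : l ≠ []) :
    PySem.Str.join sep (l ++ [x]) = PySem.Str.join sep l ++ sep ++ x := by
  apply String.toList_inj.mp
  simp only [String.toList_append, PySem.Str.toList_join, List.map_append, List.map_cons,
    List.map_nil]
  exact chars_join_append_singleton sep.toList x.toList _ (by simpa using h)

lemma exprE_base (t i : Int) :
    exprE t i i = PySem.Int.toStr t ++ "=" ++ PySem.Int.toStr i := by
  unfold exprE
  rw [PySem.List.pyRange_one_singleton]
  apply String.toList_inj.mp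
  simp [PySem.Str.toList_join, PySem.Chars.join_singleton]

lemma exprE_step (t i m : Int) (h : i ≤ m) :
    exprE t i (m + 1) = exprE t i m ++ "+" ++ PySem.Int.toStr (m + 1) := by
  unfold exprE
  rw [show m + 1 + 1 = (m + 1) + 1 from rfl, PySem.List.pyRange_one_succ_right (by omega)]
  rw [List.map_append, List.map_cons, List.map_nil,
    join_append_singleton _ _ _ (by
      intro hnil
      have h0 := List.map_eq_nil_iff.mp hnil
      have hlen := PySem.List.length_pyRange_one i (m + 1)
      rw [h0] at hlen
      simp at hlen
      omega)]
  simp [String.append_assoc]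

-- j*j + j is injective on j ≥ 0
lemma sq_add_inj (a b : Int) (ha : 0 ≤ a) (hb : 0 ≤ b) (h : a * a + a = b * b + b) : a = b := by
  rcases lt_trichotomy a b with hlt | heq | hgt
  · nlinarith
  · exact heq
  · nlinarith

lemma solveJ_some_iff (t i j : Int) (hi : 1 ≤ i) :
    solveJ t i = some j ↔ i + 1 ≤ j ∧ j * j + j = i * i - i + 2 * t := by
  have hii : 0 ≤ i * i - i := by nlinarith
  constructor
  · intro h
    unfold solveJ at h
    split_ifs at h with h1 h2
    · obtain ⟨hr, hodd⟩ := h1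
      set r : Int := (Nat.sqrt (1 + 4 * (i * i - i + 2 * t)).toNat : Int) with hrdef
      have hr0 : 0 ≤ r := by positivity
      rw [PySem.Int.mod_eq_emod_of_pos (by norm_num)] at hodd
      rw [PySem.Int.floordiv_eq_ediv_of_pos (by norm_num)] at h h2
      have hj := Option.some.inj h
      refine ⟨by omega, ?_⟩
      have h2j : r = 2 * j + 1 := by omega
      rw [h2j] at hr
      nlinarith [hr]
  · rintro ⟨hj, heq⟩
    have hj2 : 2 ≤ j := by omega
    have hdisc : 1 + 4 * (i * i - i + 2 * t) = (2 * j + 1) * (2 * j + 1) := by nlinarith [heq]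
    set m : Nat := (2 * j + 1).toNat with hm
    have hmz : (m : Int) = 2 * j + 1 := Int.toNat_of_nonneg (by omega)
    have hcast : 1 + 4 * (i * i - i + 2 * t) = ((m * m : Nat) : Int) := by
      push_cast [hmz]
      linarith [hdisc]
    have htn : (1 + 4 * (i * i - i + 2 * t)).toNat = m * m := by
      rw [hcast]
      exact Int.toNat_natCast _
    have hsq : (Nat.sqrt (1 + 4 * (i * i - i + 2 * t)).toNat : Int) = 2 * j + 1 := by
      rw [htn, Nat.sqrt_eq, hmz]
    unfold solveJ
    rw [hsq, PySem.Int.floordiv_eq_ediv_of_pos (by norm_num),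
      PySem.Int.mod_eq_emod_of_pos (by norm_num)]
    rw [if_pos ⟨hdisc.symm, by omega⟩, if_pos (by omega : i + 1 ≤ (2 * j + 1 - 1) / 2)]
    congr 1
    omega

lemma jstar_le_half (t i j : Int) (hi : 1 ≤ i) (hj : i + 1 ≤ j)
    (heq : j * j + j = i * i - i + 2 * t) : j ≤ pyCeilHalf t := by
  have hb := ceilHalf_bounds t
  have h1 : 4 * j - 2 ≤ 2 * t := by
    nlinarith [mul_nonneg (by linarith : (0:Int) ≤ j - 1 - i) (by linarith : (0:Int) ≤ j + i - 2)]
  omega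

lemma innerA_found (t i : Int) (hi : 1 ≤ i) (jstar : Int) (hjs : i + 1 ≤ jstar)
    (heq : jstar * jstar + jstar = i * i - i + 2 * t) :
    ∀ (n : Nat) (j0 sum : Int) (expr : String) (res : List String) (cnt : Int),
      (jstar - j0).toNat = n → i + 1 ≤ j0 → j0 ≤ jstar →
      2 * sum = (j0 - 1) * j0 - (i * i - i) →
      expr = exprE t i (j0 - 1) →
      innerA t (PySem.List.pyRange j0 (pyCeilHalf t + 1) 1) sum expr res cnt
        = (res ++ [exprE t i jstar], cnt + 1) := by
  have hhb := jstar_le_half t i jstar hi hjs heq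
  intro n
  induction n with
  | zero =>
    intro j0 sum expr res cnt hn hj0 hle hsum hexpr
    have hj0e : j0 = jstar := by omega
    subst hj0e
    rw [PySem.List.pyRange_one_cons (by omega)]
    simp only [innerA]
    have hsum' : sum + j0 = t := by nlinarith [hsum, heq]
    rw [if_pos hsum', hexpr]
    have hstep := exprE_step t i (j0 - 1) (by omega)
    rw [show j0 - 1 + 1 = j0 by ring] at hstep
    rw [← hstep]
  | succ n ih =>
    intro j0 sum expr res cnt hn hj0 hle hsum hexpr
    have hlt : j0 < jstar := by omega
    rw [PySem.List.pyRange_one_cons (by omega)]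
    simp only [innerA]
    have hne : ¬(sum + j0 = t) := by
      intro hEq
      have h1 : j0 * j0 + j0 = i * i - i + 2 * t := by nlinarith [hsum, hEq]
      have := sq_add_inj j0 jstar (by omega) (by omega) (h1.trans heq.symm)
      omega
    rw [if_neg hne]
    have hstep := exprE_step t i (j0 - 1) (by omega)
    rw [show j0 - 1 + 1 = j0 by ring] at hstep
    exact ih (j0 + 1) (sum + j0) _ res cnt (by omega) (by omega) (by omega)
      (by nlinarith [hsum]) (by rw [hexpr, ← hstep, show j0 + 1 - 1 = j0 by ring])

lemma innerA_notfound (t i : Int)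
    (hnone : ∀ j, i + 1 ≤ j → j * j + j ≠ i * i - i + 2 * t) :
    ∀ (n : Nat) (j0 sum : Int) (expr : String) (res : List String) (cnt : Int),
      (pyCeilHalf t + 1 - j0).toNat = n → i + 1 ≤ j0 →
      2 * sum = (j0 - 1) * j0 - (i * i - i) →
      innerA t (PySem.List.pyRange j0 (pyCeilHalf t + 1) 1) sum expr res cnt = (res, cnt) := by
  intro n
  induction n with
  | zero =>
    intro j0 sum expr res cnt hn hj0 hsum
    rw [PySem.List.pyRange_one_eq_nil (by omega)]
    rfl
  | succ n ih =>
    intro j0 sum expr res cnt hn hj0 hsum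
    rw [PySem.List.pyRange_one_cons (by omega)]
    simp only [innerA]
    have hne : ¬(sum + j0 = t) := by
      intro hEq
      exact hnone j0 hj0 (by nlinarith [hsum, hEq])
    rw [if_neg hne]
    exact ih (j0 + 1) (sum + j0) _ res cnt (by omega) (by omega) (by nlinarith [hsum])

lemma innerA_hit (t i : Int) (hi : 1 ≤ i)
    (res : List String) (cnt : Int) :
    innerA t (PySem.List.pyRange (i + 1) (pyCeilHalf t + 1) 1) i
        (PySem.Int.toStr t ++ "=" ++ PySem.Int.toStr i) res cnt
      = (res ++ hitT t i, cnt + ((hitT t i).length : Int)) := by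
  have hb := ceilHalf_bounds t
  rcases h : solveJ t i with _ | j
  · have hnone : ∀ j, i + 1 ≤ j → j * j + j ≠ i * i - i + 2 * t := by
      intro j hj hne
      have := (solveJ_some_iff t i j hi).mpr ⟨hj, hne⟩
      rw [h] at this
      simp at this
    rw [innerA_notfound t i hnone (pyCeilHalf t + 1 - (i + 1)).toNat (i + 1) i _ res cnt rfl
      (le_refl _) (by ring)]
    simp [hitT, h]
  · obtain ⟨hj, heq⟩ := (solveJ_some_iff t i j hi).mp h
    rw [innerA_found t i hi j hj heq (j - (i + 1)).toNat (i + 1) i _ res cnt rfl (le_refl _) hj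
      (by ring) (by rw [show i + 1 - 1 = i by ring, exprE_base])]
    simp [hitT, h]

lemma foldl_hits (t : Int) :
    ∀ (l : List Int) (res : List String) (cnt : Int),
      (∀ i ∈ l, 1 ≤ i) →
      l.foldl
          (fun (acc : List String × Int) i =>
            innerA t (PySem.List.pyRange (i + 1) (pyCeilHalf t + 1) 1) i
              (PySem.Int.toStr t ++ "=" ++ PySem.Int.toStr i) acc.1 acc.2)
          (res, cnt)
        = (res ++ l.flatMap (hitT t), cnt + ((l.flatMap (hitT t)).length : Int)) := by
  intro l
  induction l with
  | nil => intro res cnt _; simp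
  | cons x xs ih =>
    intro res cnt hmem
    obtain ⟨hx, hxs⟩ := List.forall_mem_cons.mp hmem
    simp only [List.foldl_cons]
    rw [innerA_hit t x hx res cnt, ih _ _ hxs]
    simp only [List.flatMap_cons, List.length_append]
    refine Prod.ext ?_ ?_
    · simp [List.append_assoc]
    · simp only
      push_cast
      ring

lemma hitT_reverse (t i : Int) : (hitT t i).reverse = hitT t i := by
  unfold hitT; rcases solveJ t i <;> simp

theorem solve_method_1_spec_aux (t : Int) : solve_method_1 t = solve_method_1_alt t := by
  unfold solve_method_1 solve_method_1_alt
  have hbody : (fun (found : List String) (i : Int) =>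
      let disc := 1 + 4 * (i * i - i + 2 * t)
      let r : Int := (Nat.sqrt disc.toNat : Int)
      if r * r = disc ∧ PySem.Int.mod r 2 = 1 then
        let j := PySem.Int.floordiv (r - 1) 2
        if i + 1 ≤ j then
          found ++ [PySem.Int.toStr t ++ "=" ++
            PySem.Str.join "+" ((PySem.List.pyRange i (j + 1) 1).map PySem.Int.toStr)]
        else found
      else found)
      = (fun (found : List String) (i : Int) => found ++ hitT t i) := by
    funext found i
    dsimp only
    unfold hitT solveJ exprE
    split_ifs <;> simp
  dsimp only
  rw [hbody, PySem.List.foldl_append_eq_flatMap]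
  rw [PySem.List.pyRange_neg_one_eq_reverse]
  rw [show (0 : Int) + 1 = 1 from rfl, show pyCeilHalf t - 1 + 1 = pyCeilHalf t by ring]
  rw [foldl_hits t _ _ _ (by
    intro i hi
    rw [List.mem_reverse, PySem.List.mem_pyRange_one] at hi
    omega)]
  have hrev : ((PySem.List.pyRange 1 (pyCeilHalf t) 1).reverse).flatMap (hitT t)
      = ((PySem.List.pyRange 1 (pyCeilHalf t) 1).flatMap (hitT t)).reverse := by
    rw [List.reverse_flatMap]
    congr 1
    funext i
    exact (hitT_reverse t i).symm
  rw [hrev]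
  simp

-- ===== VERDICT (by name: the statement is the Claim_ definition above) =====
theorem solve_method_1_spec : Claim_equal_solve_method_1 := by
  intro t _
  unfold Spec_solve_method_1
  exact solve_method_1_spec_aux t
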